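-- pv_equiv track=rewrite | github.com/wongwaituck/advent-of-code-2020 | 12/solve.py | nav_norm
-- ===== SOURCE A (Python) =====
-- def change_dir(op: str, d: str, degree: int):
--     directions = list("NESW")
--     idx = directions.index(d)
--     if op == 'R':
--         new_idx = (degree//90 + idx) % 4
--     elif op == 'L':
--         new_idx = ((-degree)//90 + idx) % 4
--     return directions[new_idx]
--
-- def nav_norm(op: str, val: int, d: str, x:int, y:int) -> tuple[int,int,str]:
--     if op == 'N':
--         y += val
--     elif op == 'E':
--         x += val
--     elif op == 'W':
--         x -= val
--     elif op == 'S':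
--         y -= val
--     elif op == 'F':
--         return nav_norm(d, val, d, x, y)
--     elif op == 'R' or op == 'L':
--         new_d = change_dir(op, d, val)
--         return (x, y, new_d)
--     return (x, y, d)
-- ===== SOURCE B (Python) =====
-- def nav_norm(op, val, d, x, y):
--     # The four cardinals form one rotation cycle: walk it instead of branching per letter.
--     succ = {'N': 'E', 'E': 'S', 'S': 'W', 'W': 'N'}
--     if op == 'F':
--         op = d
--     if op in succ:
--         # rotate the north vector (0, val) one quarter turn clockwise per step N -> op
--         c, dx, dy = 'N', 0, val
--         while c != op:
--             c, dx, dy = succ[c], dy, -dx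
--         return (x + dx, y + dy, d)
--     if op == 'R' or op == 'L':
--         k = (val // 90 if op == 'R' else (-val) // 90) % 4
--         nd = d
--         for _ in range(k):
--             nd = succ[nd]
--         return (x, y, nd)
--     return (x, y, d)
-- ===== Notes on version B (the rewrite author's own statement) =====
-- stated objective: alternative
-- what changed: B treats NESW as one rotation cycle (a successor map): movement is computed by walking a quarter-turn rotation of the north vector (0,val) until the cycle reaches op, and R/L rotation is k iterated successor steps with k=(degrees//90)%4, replacing A's per-letter branch chain, recursive 'F' call and change_dir index arithmetic.
import Mathlib
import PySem

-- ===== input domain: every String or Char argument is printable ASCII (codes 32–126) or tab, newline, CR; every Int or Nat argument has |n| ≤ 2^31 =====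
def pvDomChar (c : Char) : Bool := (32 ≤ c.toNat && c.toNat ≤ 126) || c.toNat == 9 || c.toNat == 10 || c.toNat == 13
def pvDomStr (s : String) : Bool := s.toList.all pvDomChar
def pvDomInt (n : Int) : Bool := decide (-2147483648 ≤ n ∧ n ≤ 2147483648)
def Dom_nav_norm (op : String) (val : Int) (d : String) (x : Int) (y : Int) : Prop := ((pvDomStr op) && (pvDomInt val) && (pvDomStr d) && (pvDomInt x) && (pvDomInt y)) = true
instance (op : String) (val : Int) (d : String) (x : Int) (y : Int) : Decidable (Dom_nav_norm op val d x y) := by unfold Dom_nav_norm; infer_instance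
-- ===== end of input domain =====

-- B walks the NESW rotation cycle (successor map + quarter-turn vector rotation) instead of
-- A's per-letter branch chain with a recursive 'F' call; objective: alternative, same cost.

-- ===== PORT A =====
-- change_dir: returns none where Python raises (d not in NESW) or leaves new_idx unbound (op not R/L; never reached)
def change_dirA (op : String) (d : String) (degree : Int) : Option String :=
  let directions : List String := ["N", "E", "S", "W"]
  match PySem.List.index? directions d with
  | none => none
  | some idx =>
    if op = "R" then
      PySem.List.pyGet? directions (PySem.Int.mod (PySem.Int.floordiv degree 90 + (idx : Int)) 4)
    else if op = "L" then
      PySem.List.pyGet? directions (PySem.Int.mod (PySem.Int.floordiv (-degree) 90 + (idx : Int)) 4)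
    else none

-- fuel makes A's self-call ('F' replaces op by d) structural; fuel 2 is exact on Pre_ (the
-- recursive call never has op = "F" there), fuel 0 is never reached inside Pre_.
def nav_normFuel (fuel : Nat) (op : String) (val : Int) (d : String) (x : Int) (y : Int) : Int × Int × String :=
  match fuel with
  | 0 => (x, y, d)
  | f + 1 =>
    if op = "N" then (x, y + val, d)
    else if op = "E" then (x + val, y, d)
    else if op = "W" then (x - val, y, d)
    else if op = "S" then (x, y - val, d)
    else if op = "F" then nav_normFuel f d val d x y
    else if op = "R" ∨ op = "L" then
      match change_dirA op d val with
      | some nd => (x, y, nd)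
      | none => (x, y, d)   -- Python raises here; excluded by Pre_
    else (x, y, d)

def nav_norm (op : String) (val : Int) (d : String) (x : Int) (y : Int) : Int × Int × String :=
  nav_normFuel 2 op val d x y

-- ===== PORT B =====
-- the successor map of B ({'N':'E','E':'S','S':'W','W':'N'})
def succD : PySem.Dict String String :=
  PySem.Dict.ofList [("N", "E"), ("E", "S"), ("S", "W"), ("W", "N")]

-- B's while loop: walk the cycle from 'N', rotating (dx,dy) a quarter turn clockwise per
-- step, until c = op; fuel 4 is exact since op is a key of succD when this runs (the cycle
-- reaches every key within 3 steps).  none-branch mirrors a KeyError (unreachable then).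
def walkB (fuel : Nat) (op c : String) (dx dy : Int) : Int × Int :=
  match fuel with
  | 0 => (dx, dy)
  | f + 1 =>
    if c = op then (dx, dy)
    else
      match succD.get? c with
      | some c' => walkB f op c' dy (-dx)
      | none => (dx, dy)

def nav_norm_alt (op : String) (val : Int) (d : String) (x : Int) (y : Int) : Int × Int × String :=
  let op := if op = "F" then d else op
  if (succD.get? op).isSome then
    let (dx, dy) := walkB 4 op "N" 0 val
    (x + dx, y + dy, d)
  else if op = "R" ∨ op = "L" then
    let k : Int := PySem.Int.mod (if op = "R" then PySem.Int.floordiv val 90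
                                 else PySem.Int.floordiv (-val) 90) 4
    -- for _ in range(k): nd = succ[nd]   (Option state: none = KeyError, excluded by Pre_)
    match (PySem.List.pyRange 0 k 1).foldl (fun acc _ => acc.bind succD.get?) (some d) with
    | some nd => (x, y, nd)
    | none => (x, y, d)
  else (x, y, d)

-- ===== PRECONDITION & SPEC =====
-- Pre_ excludes exactly the inputs where A does not return: op="F" with d="F" (infinite
-- recursion) or d="R"/"L" (the recursive call reaches change_dir with d not in NESW →
-- ValueError), and op="R"/"L" with d not in NESW (ValueError in change_dir).
def Pre_nav_norm (op : String) (val : Int) (d : String) (x : Int) (y : Int) : Prop :=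
  ¬(op = "F" ∧ (d = "F" ∨ d = "R" ∨ d = "L")) ∧
  ((op = "R" ∨ op = "L") → (d = "N" ∨ d = "E" ∨ d = "S" ∨ d = "W"))
instance (op : String) (val : Int) (d : String) (x : Int) (y : Int) : Decidable (Pre_nav_norm op val d x y) := by unfold Pre_nav_norm; infer_instance

def pvWitness_nav_norm : String × Int × String × Int × Int := ("F", 10, "E", 3, 4)

def Spec_nav_norm (op : String) (val : Int) (d : String) (x : Int) (y : Int) (out : Int × Int × String) : Prop := out = nav_norm_alt op val d x y
instance (op : String) (val : Int) (d : String) (x : Int) (y : Int) (out : Int × Int × String) : Decidable (Spec_nav_norm op val d x y out) := by unfold Spec_nav_norm; infer_instance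

-- ===== CLAIM (what is proved, stated in full; the proofs are below) =====
def Claim_equal_nav_norm : Prop := ∀ (op : String) (val : Int) (d : String) (x : Int) (y : Int), Dom_nav_norm op val d x y → Pre_nav_norm op val d x y → Spec_nav_norm op val d x y (nav_norm op val d x y)

-- ===== LEMMAS AND PROOFS =====

-- ===== VERDICT (by name: the statement is the Claim_ definition above) =====
theorem nav_norm_spec : Claim_equal_nav_norm := by
  intro op val d x y _ hpre
  obtain ⟨h1, h2⟩ := hpre
  show nav_norm op val d x y = nav_norm_alt op val d x y
  by_cases hN : op = "N"
  · subst hN; simp [nav_norm, nav_normFuel, nav_norm_alt, change_dirA, walkB,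
      PySem.List.index?, List.idxOf?, List.findIdx?, List.findIdx?.go,
      PySem.List.pyGet?, PySem.List.pyIdx?, PySem.List.pyRange, succD,
      PySem.Dict.ofList, PySem.Dict.get?, PySem.Dict.update, PySem.Dict.insert, PySem.Dict.empty,
      List.find?, List.foldl, List.range_succ, sub_eq_add_neg]
  by_cases hE : op = "E"
  · subst hE; simp [nav_norm, nav_normFuel, nav_norm_alt, change_dirA, walkB,
      PySem.List.index?, List.idxOf?, List.findIdx?, List.findIdx?.go,
      PySem.List.pyGet?, PySem.List.pyIdx?, PySem.List.pyRange, succD,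
      PySem.Dict.ofList, PySem.Dict.get?, PySem.Dict.update, PySem.Dict.insert, PySem.Dict.empty,
      List.find?, List.foldl, List.range_succ, sub_eq_add_neg]
  by_cases hW : op = "W"
  · subst hW; simp [nav_norm, nav_normFuel, nav_norm_alt, change_dirA, walkB,
      PySem.List.index?, List.idxOf?, List.findIdx?, List.findIdx?.go,
      PySem.List.pyGet?, PySem.List.pyIdx?, PySem.List.pyRange, succD,
      PySem.Dict.ofList, PySem.Dict.get?, PySem.Dict.update, PySem.Dict.insert, PySem.Dict.empty,
      List.find?, List.foldl, List.range_succ, sub_eq_add_neg]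
  by_cases hS : op = "S"
  · subst hS; simp [nav_norm, nav_normFuel, nav_norm_alt, change_dirA, walkB,
      PySem.List.index?, List.idxOf?, List.findIdx?, List.findIdx?.go,
      PySem.List.pyGet?, PySem.List.pyIdx?, PySem.List.pyRange, succD,
      PySem.Dict.ofList, PySem.Dict.get?, PySem.Dict.update, PySem.Dict.insert, PySem.Dict.empty,
      List.find?, List.foldl, List.range_succ, sub_eq_add_neg]
  by_cases hF : op = "F"
  · subst hF
    have hd : ¬(d = "F" ∨ d = "R" ∨ d = "L") := fun h => h1 ⟨rfl, h⟩
    push Not at hd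
    obtain ⟨hdF, hdR, hdL⟩ := hd
    by_cases hdN : d = "N"
    · subst hdN; simp [nav_norm, nav_normFuel, nav_norm_alt, change_dirA, walkB,
      PySem.List.index?, List.idxOf?, List.findIdx?, List.findIdx?.go,
      PySem.List.pyGet?, PySem.List.pyIdx?, PySem.List.pyRange, succD,
      PySem.Dict.ofList, PySem.Dict.get?, PySem.Dict.update, PySem.Dict.insert, PySem.Dict.empty,
      List.find?, List.foldl, List.range_succ, sub_eq_add_neg]
    by_cases hdE : d = "E"
    · subst hdE; simp [nav_norm, nav_normFuel, nav_norm_alt, change_dirA, walkB,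
      PySem.List.index?, List.idxOf?, List.findIdx?, List.findIdx?.go,
      PySem.List.pyGet?, PySem.List.pyIdx?, PySem.List.pyRange, succD,
      PySem.Dict.ofList, PySem.Dict.get?, PySem.Dict.update, PySem.Dict.insert, PySem.Dict.empty,
      List.find?, List.foldl, List.range_succ, sub_eq_add_neg]
    by_cases hdW : d = "W"
    · subst hdW; simp [nav_norm, nav_normFuel, nav_norm_alt, change_dirA, walkB,
      PySem.List.index?, List.idxOf?, List.findIdx?, List.findIdx?.go,
      PySem.List.pyGet?, PySem.List.pyIdx?, PySem.List.pyRange, succD,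
      PySem.Dict.ofList, PySem.Dict.get?, PySem.Dict.update, PySem.Dict.insert, PySem.Dict.empty,
      List.find?, List.foldl, List.range_succ, sub_eq_add_neg]
    by_cases hdS : d = "S"
    · subst hdS; simp [nav_norm, nav_normFuel, nav_norm_alt, change_dirA, walkB,
      PySem.List.index?, List.idxOf?, List.findIdx?, List.findIdx?.go,
      PySem.List.pyGet?, PySem.List.pyIdx?, PySem.List.pyRange, succD,
      PySem.Dict.ofList, PySem.Dict.get?, PySem.Dict.update, PySem.Dict.insert, PySem.Dict.empty,
      List.find?, List.foldl, List.range_succ, sub_eq_add_neg]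
    · simp [nav_norm, nav_normFuel, nav_norm_alt, change_dirA, walkB,
      PySem.List.index?, List.idxOf?, List.findIdx?, List.findIdx?.go,
      PySem.List.pyGet?, PySem.List.pyIdx?, PySem.List.pyRange, succD,
      PySem.Dict.ofList, PySem.Dict.get?, PySem.Dict.update, PySem.Dict.insert, PySem.Dict.empty,
      List.find?, List.foldl, List.range_succ, sub_eq_add_neg, hdN, hdE, hdW, hdS, hdF, hdR, hdL,
        beq_eq_false_iff_ne.mpr (Ne.symm hdN), beq_eq_false_iff_ne.mpr (Ne.symm hdE),
        beq_eq_false_iff_ne.mpr (Ne.symm hdS), beq_eq_false_iff_ne.mpr (Ne.symm hdW)]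
  by_cases hR : op = "R"
  · subst hR
    have hm : ∀ a : Int, PySem.Int.mod a 4 = a % 4 := fun a => PySem.Int.mod_eq_emod_of_pos (by norm_num)
    rcases h2 (Or.inl rfl) with h | h | h | h <;> subst h <;>
    · simp only [nav_norm, nav_normFuel, nav_norm_alt, change_dirA, hm]
      generalize PySem.Int.floordiv val 90 = f
      have hb : f % 4 = 0 ∨ f % 4 = 1 ∨ f % 4 = 2 ∨ f % 4 = 3 := by omega
      rcases hb with hk | hk | hk | hk <;>
      · have hA : ∀ i : Int, (f + i) % 4 = (f % 4 + i % 4) % 4 := fun i => by omega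
        simp [hA, hk, nav_norm, nav_normFuel, nav_norm_alt, change_dirA, walkB,
      PySem.List.index?, List.idxOf?, List.findIdx?, List.findIdx?.go,
      PySem.List.pyGet?, PySem.List.pyIdx?, PySem.List.pyRange, succD,
      PySem.Dict.ofList, PySem.Dict.get?, PySem.Dict.update, PySem.Dict.insert, PySem.Dict.empty,
      List.find?, List.foldl, List.range_succ, sub_eq_add_neg]
  by_cases hL : op = "L"
  · subst hL
    have hm : ∀ a : Int, PySem.Int.mod a 4 = a % 4 := fun a => PySem.Int.mod_eq_emod_of_pos (by norm_num)
    rcases h2 (Or.inr rfl) with h | h | h | h <;> subst h <;>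
    · simp only [nav_norm, nav_normFuel, nav_norm_alt, change_dirA, hm]
      generalize PySem.Int.floordiv (-val) 90 = f
      have hb : f % 4 = 0 ∨ f % 4 = 1 ∨ f % 4 = 2 ∨ f % 4 = 3 := by omega
      rcases hb with hk | hk | hk | hk <;>
      · have hA : ∀ i : Int, (f + i) % 4 = (f % 4 + i % 4) % 4 := fun i => by omega
        simp [hA, hk, nav_norm, nav_normFuel, nav_norm_alt, change_dirA, walkB,
      PySem.List.index?, List.idxOf?, List.findIdx?, List.findIdx?.go,
      PySem.List.pyGet?, PySem.List.pyIdx?, PySem.List.pyRange, succD,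
      PySem.Dict.ofList, PySem.Dict.get?, PySem.Dict.update, PySem.Dict.insert, PySem.Dict.empty,
      List.find?, List.foldl, List.range_succ, sub_eq_add_neg]
  · simp [nav_norm, nav_normFuel, nav_norm_alt, change_dirA, walkB,
      PySem.List.index?, List.idxOf?, List.findIdx?, List.findIdx?.go,
      PySem.List.pyGet?, PySem.List.pyIdx?, PySem.List.pyRange, succD,
      PySem.Dict.ofList, PySem.Dict.get?, PySem.Dict.update, PySem.Dict.insert, PySem.Dict.empty,
      List.find?, List.foldl, List.range_succ, sub_eq_add_neg, hN, hE, hW, hS, hF, hR, hL,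
      beq_eq_false_iff_ne.mpr (Ne.symm hN), beq_eq_false_iff_ne.mpr (Ne.symm hE),
      beq_eq_false_iff_ne.mpr (Ne.symm hS), beq_eq_false_iff_ne.mpr (Ne.symm hW)]
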